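-- pv_equiv track=rewrite | github.com/qeedquan/challenges | codewars/simple-eviternity-numbers.py | eviternity
-- ===== SOURCE A (Python) =====
-- def eviternity(n):
--     if n < 1:
--         return False
--
--     c = [0, 0, 0]
--     while n > 0:
--         d = n % 10
--         if d == 8:
--             c[2] += 1
--         elif d == 5:
--             c[1] += 1
--         elif d == 3:
--             c[0] += 1
--         else:
--             return False
--         n //= 10
--     return c[0] <= c[1] and c[1] <= c[2]
-- ===== SOURCE B (Python) =====
-- def eviternity(n):
--     if n < 1:
--         return False
--     s = str(n)
--     if any(c not in "358" for c in s):
--         return False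
--     return s.count('3') <= s.count('5') and s.count('5') <= s.count('8')
-- ===== Notes on version B (the rewrite author's own statement) =====
-- stated objective: simpler
-- what changed: Replaces A's single arithmetic digit loop with interleaved validation and in-loop counters by a validate-then-tally decomposition over str(n): one membership scan rejects any digit outside the allowed set, then three per-digit str.count tallies are compared in order.
import Mathlib
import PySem

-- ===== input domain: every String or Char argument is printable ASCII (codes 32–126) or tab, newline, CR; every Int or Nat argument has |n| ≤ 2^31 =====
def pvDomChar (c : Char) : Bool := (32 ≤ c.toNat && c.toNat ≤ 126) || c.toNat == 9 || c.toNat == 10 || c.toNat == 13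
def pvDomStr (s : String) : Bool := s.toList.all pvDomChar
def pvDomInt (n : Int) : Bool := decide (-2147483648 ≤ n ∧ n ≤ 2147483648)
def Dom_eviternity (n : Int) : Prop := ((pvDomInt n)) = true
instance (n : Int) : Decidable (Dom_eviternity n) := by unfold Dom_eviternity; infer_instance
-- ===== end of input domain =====

-- B replaces A's single arithmetic digit loop (in-loop counters, early return) by a
-- validate-then-tally decomposition over str(n); same cost, simpler structure.

-- ===== PORT A =====
-- A's while loop: state (n, c[0], c[1], c[2]); returns False on a digit outside {3,5,8}.
def eviternityLoop (n : Int) (c0 c1 c2 : Int) : Bool :=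
  if h : 0 < n then
    let d := PySem.Int.mod n 10
    if d = 8 then eviternityLoop (PySem.Int.floordiv n 10) c0 c1 (c2 + 1)
    else if d = 5 then eviternityLoop (PySem.Int.floordiv n 10) c0 (c1 + 1) c2
    else if d = 3 then eviternityLoop (PySem.Int.floordiv n 10) (c0 + 1) c1 c2
    else false
  else decide (c0 ≤ c1) && decide (c1 ≤ c2)
termination_by n.toNat
decreasing_by
  all_goals
    rw [PySem.Int.floordiv_eq_ediv_of_pos (by omega)]
    omega

def eviternity (n : Int) : Bool :=
  if n < 1 then false
  else eviternityLoop n 0 0 0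

-- ===== PORT B =====
def eviternity_alt (n : Int) : Bool :=
  if n < 1 then false
  else
    let s := PySem.Int.toStr n
    if s.toList.any (fun c => !(PySem.Chars.isIn [c] "358".toList)) then false
    else decide (PySem.Str.count s "3" ≤ PySem.Str.count s "5")
         && decide (PySem.Str.count s "5" ≤ PySem.Str.count s "8")

-- ===== PRECONDITION & SPEC =====
def Spec_eviternity (n : Int) (out : Bool) : Prop := out = eviternity_alt n
instance (n : Int) (out : Bool) : Decidable (Spec_eviternity n out) := by unfold Spec_eviternity; infer_instance

-- ===== CLAIM (what is proved, stated in full; the proofs are below) =====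
def Claim_equal_eviternity : Prop := ∀ (n : Int), Dom_eviternity n → Spec_eviternity n (eviternity n)

-- ===== LEMMAS AND PROOFS =====

-- proof-only helper: the value both programs compute from the digit characters,
-- with A's three accumulators made explicit
def evalChars (cs : List Char) (c0 c1 c2 : Int) : Bool :=
  if cs.all (fun c => c == '3' || c == '5' || c == '8') then
    decide (c0 + (cs.count '3' : Int) ≤ c1 + (cs.count '5' : Int)) &&
    decide (c1 + (cs.count '5' : Int) ≤ c2 + (cs.count '8' : Int))
  else false

lemma evalChars_nil (c0 c1 c2 : Int) :
    evalChars [] c0 c1 c2 = (decide (c0 ≤ c1) && decide (c1 ≤ c2)) := by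
  simp [evalChars]

lemma evalChars_append_digit (pre : List Char) (d : Char) (c0 c1 c2 : Int) :
    evalChars (pre ++ [d]) c0 c1 c2 =
      if d = '3' then evalChars pre (c0 + 1) c1 c2
      else if d = '5' then evalChars pre c0 (c1 + 1) c2
      else if d = '8' then evalChars pre c0 c1 (c2 + 1)
      else false := by
  by_cases h3 : d = '3'
  · subst h3
    simp only [evalChars, List.all_append, List.count_append]
    by_cases hall : pre.all (fun c => c == '3' || c == '5' || c == '8') = true
    · simp only [hall, Bool.true_and]
      norm_num
      apply congrArg₂ (· && ·) <;> first
        | rfl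
        | (rw [decide_eq_decide]; omega)
    · simp [hall]
  by_cases h5 : d = '5'
  · subst h5
    simp only [if_neg h3, evalChars, List.all_append, List.count_append]
    by_cases hall : pre.all (fun c => c == '3' || c == '5' || c == '8') = true
    · simp only [hall, Bool.true_and]
      norm_num
      apply congrArg₂ (· && ·) <;> first
        | rfl
        | (rw [decide_eq_decide]; omega)
    · simp [hall]
  by_cases h8 : d = '8'
  · subst h8
    simp only [if_neg h3, if_neg h5, evalChars, List.all_append, List.count_append]
    by_cases hall : pre.all (fun c => c == '3' || c == '5' || c == '8') = true
    · simp only [hall, Bool.true_and]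
      norm_num
      apply congrArg₂ (· && ·) <;> first
        | rfl
        | (rw [decide_eq_decide]; omega)
    · simp [hall]
  · simp only [if_neg h3, if_neg h5, if_neg h8, evalChars, List.all_append]
    simp [h3, h5, h8]

-- toDigitsCore threads its accumulator on the right
lemma toDigitsCore_acc (b f : Nat) : ∀ (n : Nat) (acc : List Char),
    Nat.toDigitsCore b f n acc = Nat.toDigitsCore b f n [] ++ acc := by
  induction f with
  | zero => intro n acc; simp [Nat.toDigitsCore]
  | succ f ih =>
    intro n acc
    simp only [Nat.toDigitsCore]
    by_cases h : n / b = 0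
    · simp [h]
    · simp only [h, if_false]
      rw [ih (n / b) (Nat.digitChar (n % b) :: acc), ih (n / b) [Nat.digitChar (n % b)]]
      simp

-- with enough fuel, the result does not depend on the fuel
lemma toDigitsCore_fuel (n : Nat) : ∀ (f f' : Nat) (acc : List Char), n < f → n < f' →
    Nat.toDigitsCore 10 f n acc = Nat.toDigitsCore 10 f' n acc := by
  induction n using Nat.strong_induction_on with
  | _ n ih =>
    intro f f' acc hf hf'
    obtain ⟨f, rfl⟩ : ∃ g, f = g + 1 := ⟨f - 1, by omega⟩
    obtain ⟨f', rfl⟩ : ∃ g, f' = g + 1 := ⟨f' - 1, by omega⟩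
    simp only [Nat.toDigitsCore]
    by_cases h : n / 10 = 0
    · simp [h]
    · simp only [h, if_false]
      have hlt : n / 10 < n := Nat.div_lt_self (by omega) (by norm_num)
      exact ih (n / 10) hlt f f' _ (by omega) (by omega)

-- peel the last (lowest) digit of Nat.toDigits
lemma toDigits_peel (m : Nat) (h : 0 < m) :
    Nat.toDigits 10 m =
      (if m / 10 = 0 then [] else Nat.toDigits 10 (m / 10)) ++ [Nat.digitChar (m % 10)] := by
  unfold Nat.toDigits
  have hstep : Nat.toDigitsCore 10 (m + 1) m [] =
      if m / 10 = 0 then [Nat.digitChar (m % 10)]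
      else Nat.toDigitsCore 10 m (m / 10) [Nat.digitChar (m % 10)] := by
    simp only [Nat.toDigitsCore]
  rw [hstep]
  by_cases hd : m / 10 = 0
  · simp [hd]
  · simp only [hd, if_false]
    rw [toDigitsCore_acc 10 m (m / 10) [Nat.digitChar (m % 10)]]
    have hlt : m / 10 < m := Nat.div_lt_self h (by norm_num)
    rw [toDigitsCore_fuel (m / 10) m (m / 10 + 1) [] (by omega) (by omega)]

-- A's loop computes evalChars of the decimal digits of m
lemma loop_char (m : Nat) : 0 < m → ∀ (c0 c1 c2 : Int),
    eviternityLoop (m : Int) c0 c1 c2 = evalChars (Nat.toDigits 10 m) c0 c1 c2 := by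
  induction m using Nat.strong_induction_on with
  | _ m ih =>
    intro hm c0 c1 c2
    have hpos : (0 : Int) < (m : Int) := by exact_mod_cast hm
    have hmod : PySem.Int.mod (m : Int) 10 = ((m % 10 : Nat) : Int) := by
      exact_mod_cast PySem.Int.mod_natCast m 10
    have hdiv : PySem.Int.floordiv (m : Int) 10 = ((m / 10 : Nat) : Int) := by
      exact_mod_cast PySem.Int.floordiv_natCast m 10
    rw [eviternityLoop]
    rw [dif_pos hpos]
    simp only [hmod, hdiv]
    rw [toDigits_peel m hm, evalChars_append_digit]
    have hrec : ∀ (b0 b1 b2 : Int),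
        eviternityLoop ((m / 10 : Nat) : Int) b0 b1 b2 =
          evalChars (if m / 10 = 0 then [] else Nat.toDigits 10 (m / 10)) b0 b1 b2 := by
      intro b0 b1 b2
      by_cases hq : m / 10 = 0
      · rw [hq, if_pos rfl, evalChars_nil, eviternityLoop]
        rw [dif_neg (by norm_num)]
      · rw [if_neg hq]
        exact ih (m / 10) (Nat.div_lt_self hm (by norm_num)) (by omega) b0 b1 b2
    have hlt : m % 10 < 10 := Nat.mod_lt m (by norm_num)
    have hcases : m % 10 = 0 ∨ m % 10 = 1 ∨ m % 10 = 2 ∨ m % 10 = 3 ∨ m % 10 = 4 ∨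
        m % 10 = 5 ∨ m % 10 = 6 ∨ m % 10 = 7 ∨ m % 10 = 8 ∨ m % 10 = 9 := by omega
    rcases hcases with h | h | h | h | h | h | h | h | h | h
    · rw [h, show Nat.digitChar 0 = '0' from by decide]
      rw [if_neg (show ¬((0:Nat):Int) = 8 from by norm_num),
          if_neg (show ¬((0:Nat):Int) = 5 from by norm_num),
          if_neg (show ¬((0:Nat):Int) = 3 from by norm_num)]
      rw [if_neg (show ¬('0' = '3') from by decide),
          if_neg (show ¬('0' = '5') from by decide),
          if_neg (show ¬('0' = '8') from by decide)]
    · rw [h, show Nat.digitChar 1 = '1' from by decide]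
      rw [if_neg (show ¬((1:Nat):Int) = 8 from by norm_num),
          if_neg (show ¬((1:Nat):Int) = 5 from by norm_num),
          if_neg (show ¬((1:Nat):Int) = 3 from by norm_num)]
      rw [if_neg (show ¬('1' = '3') from by decide),
          if_neg (show ¬('1' = '5') from by decide),
          if_neg (show ¬('1' = '8') from by decide)]
    · rw [h, show Nat.digitChar 2 = '2' from by decide]
      rw [if_neg (show ¬((2:Nat):Int) = 8 from by norm_num),
          if_neg (show ¬((2:Nat):Int) = 5 from by norm_num),
          if_neg (show ¬((2:Nat):Int) = 3 from by norm_num)]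
      rw [if_neg (show ¬('2' = '3') from by decide),
          if_neg (show ¬('2' = '5') from by decide),
          if_neg (show ¬('2' = '8') from by decide)]
    · rw [h, show Nat.digitChar 3 = '3' from by decide]
      rw [if_neg (show ¬((3:Nat):Int) = 8 from by norm_num),
          if_neg (show ¬((3:Nat):Int) = 5 from by norm_num),
          if_pos (show ((3:Nat):Int) = 3 from by norm_num), hrec]
      rw [if_pos (show ('3':Char) = '3' from rfl)]
    · rw [h, show Nat.digitChar 4 = '4' from by decide]
      rw [if_neg (show ¬((4:Nat):Int) = 8 from by norm_num),
          if_neg (show ¬((4:Nat):Int) = 5 from by norm_num),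
          if_neg (show ¬((4:Nat):Int) = 3 from by norm_num)]
      rw [if_neg (show ¬('4' = '3') from by decide),
          if_neg (show ¬('4' = '5') from by decide),
          if_neg (show ¬('4' = '8') from by decide)]
    · rw [h, show Nat.digitChar 5 = '5' from by decide]
      rw [if_neg (show ¬((5:Nat):Int) = 8 from by norm_num),
          if_pos (show ((5:Nat):Int) = 5 from by norm_num), hrec]
      rw [if_neg (show ¬('5' = '3') from by decide),
          if_pos (show ('5':Char) = '5' from rfl)]
    · rw [h, show Nat.digitChar 6 = '6' from by decide]
      rw [if_neg (show ¬((6:Nat):Int) = 8 from by norm_num),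
          if_neg (show ¬((6:Nat):Int) = 5 from by norm_num),
          if_neg (show ¬((6:Nat):Int) = 3 from by norm_num)]
      rw [if_neg (show ¬('6' = '3') from by decide),
          if_neg (show ¬('6' = '5') from by decide),
          if_neg (show ¬('6' = '8') from by decide)]
    · rw [h, show Nat.digitChar 7 = '7' from by decide]
      rw [if_neg (show ¬((7:Nat):Int) = 8 from by norm_num),
          if_neg (show ¬((7:Nat):Int) = 5 from by norm_num),
          if_neg (show ¬((7:Nat):Int) = 3 from by norm_num)]
      rw [if_neg (show ¬('7' = '3') from by decide),
          if_neg (show ¬('7' = '5') from by decide),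
          if_neg (show ¬('7' = '8') from by decide)]
    · rw [h, show Nat.digitChar 8 = '8' from by decide]
      rw [if_pos (show ((8:Nat):Int) = 8 from by norm_num), hrec]
      rw [if_neg (show ¬('8' = '3') from by decide),
          if_neg (show ¬('8' = '5') from by decide),
          if_pos (show ('8':Char) = '8' from rfl)]
    · rw [h, show Nat.digitChar 9 = '9' from by decide]
      rw [if_neg (show ¬((9:Nat):Int) = 8 from by norm_num),
          if_neg (show ¬((9:Nat):Int) = 5 from by norm_num),
          if_neg (show ¬((9:Nat):Int) = 3 from by norm_num)]
      rw [if_neg (show ¬('9' = '3') from by decide),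
          if_neg (show ¬('9' = '5') from by decide),
          if_neg (show ¬('9' = '8') from by decide)]

-- membership of one character in the literal "358"
lemma isIn_358 (c : Char) :
    PySem.Chars.isIn [c] "358".toList = (c == '3' || c == '5' || c == '8') := by
  have h358 : "358".toList = ['3', '5', '8'] := by decide
  rw [h358]
  by_cases h : c = '3' ∨ c = '5' ∨ c = '8'
  · have hin : PySem.Chars.isIn [c] ['3', '5', '8'] = true := by
      rw [PySem.Chars.isIn_iff_infix]
      rcases h with h | h | h <;> subst h
      · exact ⟨[], ['5', '8'], rfl⟩
      · exact ⟨['3'], ['8'], rfl⟩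
      · exact ⟨['3', '5'], [], rfl⟩
    rw [hin]
    rcases h with h | h | h <;> subst h <;> decide
  · rw [not_or, not_or] at h
    obtain ⟨h3, h5, h8⟩ := h
    have hnin : PySem.Chars.isIn [c] ['3', '5', '8'] = false := by
      rw [PySem.Chars.isIn_eq_false_iff]
      intro hinf
      have hc : c ∈ ['3', '5', '8'] := hinf.subset (by simp)
      simp at hc
      tauto
    rw [hnin]
    simp [h3, h5, h8]

-- s.count(c) for a single character is the list count of c
lemma count_go_singleton (c : Char) : ∀ (f : Nat) (s : List Char) (acc : Nat), s.length ≤ f →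
    PySem.Chars.count.go [c] f s acc = acc + s.count c := by
  intro f
  induction f with
  | zero =>
    intro s acc h
    cases s with
    | nil => simp [PySem.Chars.count.go]
    | cons a t => simp at h
  | succ f ih =>
    intro s acc h
    cases s with
    | nil => simp [PySem.Chars.count.go]
    | cons a t =>
      simp only [PySem.Chars.count.go]
      by_cases hc : c = a
      · subst hc
        have hpre : [c].isPrefixOf (c :: t) = true := by simp [List.isPrefixOf]
        simp only [hpre, if_true, List.length_singleton, List.drop_succ_cons, List.drop_zero]
        rw [ih t (acc + 1) (by simpa using Nat.le_of_succ_le_succ h)]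
        rw [List.count_cons]
        simp
        omega
      · have hpre : [c].isPrefixOf (a :: t) = false := by
          simp [List.isPrefixOf]
          exact fun hh => absurd hh hc
        simp only [hpre, Bool.false_eq_true, if_false]
        rw [ih t acc (by simpa using Nat.le_of_succ_le_succ h)]
        rw [List.count_cons]
        simp
        intro hh
        exact absurd hh.symm hc

lemma chars_count_singleton (cs : List Char) (c : Char) :
    PySem.Chars.count cs [c] = cs.count c := by
  simp only [PySem.Chars.count, List.isEmpty_cons, Bool.false_eq_true, if_false]
  simpa using count_go_singleton c cs.length cs 0 (le_refl _)

-- ===== VERDICT (by name: the statement is the Claim_ definition above) =====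
theorem eviternity_spec : Claim_equal_eviternity := by
  intro n _
  unfold Spec_eviternity eviternity eviternity_alt
  by_cases hn : n < 1
  · simp [hn]
  · rw [if_neg hn, if_neg hn]
    have hm : ((n.toNat : Nat) : Int) = n := by omega
    have hm0 : 0 < n.toNat := by omega
    have hchars : (PySem.Int.toStr n).toList = Nat.toDigits 10 n.toNat := by
      rw [PySem.Int.toList_toStr]
      simp [PySem.Int.toChars, show ¬ n < 0 by omega]
    have hA : eviternityLoop n 0 0 0 = evalChars (Nat.toDigits 10 n.toNat) 0 0 0 := by
      rw [← hm]; exact loop_char n.toNat hm0 0 0 0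
    rw [hA]
    set cs := Nat.toDigits 10 n.toNat with hcs
    have hany : ((PySem.Int.toStr n).toList.any fun c => !(PySem.Chars.isIn [c] "358".toList))
        = !(cs.all fun c => c == '3' || c == '5' || c == '8') := by
      rw [hchars]
      simp only [isIn_358]
      rw [List.all_eq_not_any_not]
      simp
    have hcnt : ∀ (lit : String) (c : Char), lit.toList = [c] →
        PySem.Str.count (PySem.Int.toStr n) lit = cs.count c := by
      intro lit c hlit
      rw [PySem.Str.count_eq, hchars, hlit, chars_count_singleton]
    simp only [hany, hcnt "3" '3' (by decide), hcnt "5" '5' (by decide),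
      hcnt "8" '8' (by decide)]
    by_cases hall : (cs.all fun c => c == '3' || c == '5' || c == '8') = true
    · simp [evalChars, hall, Nat.cast_le]
    · simp only [Bool.not_eq_true] at hall
      simp [evalChars, hall]
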